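-- pv_equiv track=rewrite | github.com/diana7376/Labs-CS | lab1/task_1_3.py | valid_keyword
-- ===== SOURCE A (Python) =====
-- def valid_keyword(keyword):
--     # Manual uppercase conversion
--     upper_keyword = ""
--     i = 0
--     while i < len(keyword):
--         c = keyword[i]
--         if 'a' <= c <= 'z':
--             c = chr(ord(c) - (ord('a') - ord('A')))
--         upper_keyword += c
--         i += 1
--     keyword = upper_keyword
--     # Check length and all characters
--     if len(keyword) < 7:
--         return False
--     i = 0
--     while i < len(keyword):
--         c = keyword[i]
--         if not ('A' <= c <= 'Z'):
--             return False
--         i += 1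
--     return True
-- ===== SOURCE B (Python) =====
-- def valid_keyword(keyword):
--     # Single pass: count characters and check letter ranges, no uppercased copy.
--     count = 0
--     all_letters = True
--     for c in keyword:
--         count += 1
--         if not ('a' <= c <= 'z' or 'A' <= c <= 'Z'):
--             all_letters = False
--     return count >= 7 and all_letters
-- ===== Notes on version B (the rewrite author's own statement) =====
-- stated objective: faster
-- what changed: B replaces A's two passes (build a manually-uppercased copy via repeated string concatenation, then length test plus an early-return A-Z scan) with one fold over the original string maintaining a counter and an all-letters flag, never allocating the uppercase copy.
import Mathlib
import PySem

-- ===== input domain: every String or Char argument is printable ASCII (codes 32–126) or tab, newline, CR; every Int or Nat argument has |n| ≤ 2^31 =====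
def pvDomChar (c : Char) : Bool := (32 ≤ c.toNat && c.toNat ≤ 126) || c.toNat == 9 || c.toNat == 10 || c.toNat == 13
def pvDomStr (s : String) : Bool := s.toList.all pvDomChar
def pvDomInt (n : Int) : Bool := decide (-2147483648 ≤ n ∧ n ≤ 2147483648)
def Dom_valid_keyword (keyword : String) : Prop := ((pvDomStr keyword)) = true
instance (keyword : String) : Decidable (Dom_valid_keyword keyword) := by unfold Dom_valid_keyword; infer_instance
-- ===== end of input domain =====

-- B does the validation in one fold (counter + all-letters flag) instead of A's
-- uppercased-copy construction followed by a length test and a second scan; objective: simpler.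


-- ===== PORT A =====
-- A's first while-loop: append the (manually) uppercased character to the accumulator.
def vkUpperLoop (acc : List Char) (rest : List Char) : List Char :=
  match rest with
  | [] => acc
  | c :: cs =>
      let c' := if 'a' ≤ c ∧ c ≤ 'z' then Char.ofNat (c.toNat - ('a'.toNat - 'A'.toNat)) else c
      vkUpperLoop (acc ++ [c']) cs

-- A's second while-loop with its early return False.
def vkCheckLoop (rest : List Char) : Bool :=
  match rest with
  | [] => true
  | c :: cs => if ¬ ('A' ≤ c ∧ c ≤ 'Z') then false else vkCheckLoop cs

def valid_keyword (keyword : String) : Bool :=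
  let upper := vkUpperLoop [] keyword.toList
  if upper.length < 7 then false
  else vkCheckLoop upper

-- ===== PORT B =====
def valid_keyword_alt (keyword : String) : Bool :=
  let st := keyword.toList.foldl
    (fun (st : Nat × Bool) c =>
      (st.1 + 1,
       if ('a' ≤ c ∧ c ≤ 'z') ∨ ('A' ≤ c ∧ c ≤ 'Z') then st.2 else false))
    (0, true)
  decide (7 ≤ st.1) && st.2

-- ===== PRECONDITION & SPEC =====
def Spec_valid_keyword (keyword : String) (out : Bool) : Prop := out = valid_keyword_alt keyword
instance (keyword : String) (out : Bool) : Decidable (Spec_valid_keyword keyword out) := by unfold Spec_valid_keyword; infer_instance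

-- ===== CLAIM (what is proved, stated in full; the proofs are below) =====
def Claim_equal_valid_keyword : Prop := ∀ (keyword : String), Dom_valid_keyword keyword → Spec_valid_keyword keyword (valid_keyword keyword)

-- ===== LEMMAS AND PROOFS =====

def vkUp (c : Char) : Char :=
  if 'a' ≤ c ∧ c ≤ 'z' then Char.ofNat (c.toNat - ('a'.toNat - 'A'.toNat)) else c

theorem vkUpperLoop_eq_map (rest acc : List Char) :
    vkUpperLoop acc rest = acc ++ rest.map vkUp := by
  induction rest generalizing acc with
  | nil => simp [vkUpperLoop]
  | cons c cs ih => simp [vkUpperLoop, ih, vkUp]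

theorem vkCheckLoop_eq_all (l : List Char) :
    vkCheckLoop l = l.all (fun c => decide ('A' ≤ c ∧ c ≤ 'Z')) := by
  induction l with
  | nil => rfl
  | cons c cs ih =>
      simp only [vkCheckLoop, List.all_cons, ih]
      by_cases h : 'A' ≤ c ∧ c ≤ 'Z' <;> simp [h]

theorem char_le_toNat (a b : Char) : a ≤ b ↔ a.toNat ≤ b.toNat := by
  rw [Char.le_def]; exact UInt32.le_iff_toNat_le

theorem vkCheck_up (c : Char) :
    decide ('A' ≤ vkUp c ∧ vkUp c ≤ 'Z')
      = decide (('a' ≤ c ∧ c ≤ 'z') ∨ ('A' ≤ c ∧ c ≤ 'Z')) := by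
  unfold vkUp
  by_cases h : 'a' ≤ c ∧ c ≤ 'z'
  · have h1 : 97 ≤ c.toNat := (char_le_toNat _ _).mp h.1
    have h2 : c.toNat ≤ 122 := (char_le_toNat _ _).mp h.2
    have e32 : 'a'.toNat - 'A'.toNat = 32 := rfl
    have hv : (Char.ofNat (c.toNat - 32)).toNat = c.toNat - 32 := by
      have hval : (c.toNat - 32).isValidChar := Or.inl (by omega)
      rw [Char.toNat_ofNat, if_pos hval]
    have eA : 'A'.toNat = 65 := rfl
    have eZ : 'Z'.toNat = 90 := rfl
    rw [if_pos h, e32, decide_eq_true (Or.inl h)]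
    refine decide_eq_true ⟨?_, ?_⟩
    · exact (char_le_toNat _ _).mpr (by rw [hv, eA]; omega)
    · exact (char_le_toNat _ _).mpr (by rw [hv, eZ]; omega)
  · simp [h]

theorem vkFold_eq (l : List Char) (n : Nat) (b : Bool) :
    l.foldl
      (fun (st : Nat × Bool) c =>
        (st.1 + 1,
         if ('a' ≤ c ∧ c ≤ 'z') ∨ ('A' ≤ c ∧ c ≤ 'Z') then st.2 else false))
      (n, b)
      = (n + l.length,
         b && l.all (fun c => decide (('a' ≤ c ∧ c ≤ 'z') ∨ ('A' ≤ c ∧ c ≤ 'Z')))) := by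
  induction l generalizing n b with
  | nil => simp
  | cons c cs ih =>
      simp only [List.foldl_cons, List.all_cons, List.length_cons, ih]
      by_cases h : ('a' ≤ c ∧ c ≤ 'z') ∨ ('A' ≤ c ∧ c ≤ 'Z') <;>
        simp [h] <;> omega

-- ===== VERDICT (by name: the statement is the Claim_ definition above) =====
theorem valid_keyword_spec : Claim_equal_valid_keyword := by
  intro keyword _
  unfold Spec_valid_keyword valid_keyword valid_keyword_alt
  rw [vkUpperLoop_eq_map, vkFold_eq]
  simp only [List.nil_append, List.length_map, vkCheckLoop_eq_all, List.all_map,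
    Function.comp_def, Nat.zero_add, String.length_toList]
  have hall : (keyword.toList.all fun c => decide ('A' ≤ vkUp c ∧ vkUp c ≤ 'Z'))
      = keyword.toList.all
          (fun c => decide (('a' ≤ c ∧ c ≤ 'z') ∨ ('A' ≤ c ∧ c ≤ 'Z'))) := by
    induction keyword.toList with
    | nil => rfl
    | cons c cs ih => simp only [List.all_cons, ih, vkCheck_up c]
  rw [hall]
  by_cases hlen : keyword.length < 7
  · have h7 : ¬ 7 ≤ keyword.length := by omega
    simp [hlen, h7]
  · have h7 : 7 ≤ keyword.length := by omega
    simp [hlen, h7]
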